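-- pv_equiv track=rewrite | github.com/fuxx/GPG-ANSI-Art-Injector | designs/game_of_life_video.py | _seed_grid
-- ===== SOURCE A (Python) =====
-- def _seed_grid(width: int, height: int) -> list[list[bool]]:
--     grid = [[False] * width for _ in range(height)]
--
--     pi_heptomino = ((0, 0), (0, 1), (0, 2), (1, 0), (1, 2), (2, 0), (2, 2))
--     oy, ox = (height - 3) // 2, (width - 3) // 2
--     for dy, dx in pi_heptomino:
--         y, x = oy + dy, ox + dx
--         if 0 <= y < height and 0 <= x < width:
--             grid[y][x] = True
--
--     return grid
-- ===== SOURCE B (Python) =====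
-- def _seed_grid(width: int, height: int) -> list[list[bool]]:
--     pi_heptomino = ((0, 0), (0, 1), (0, 2), (1, 0), (1, 2), (2, 0), (2, 2))
--     oy, ox = (height - 3) // 2, (width - 3) // 2
--     live = {(oy + dy, ox + dx) for dy, dx in pi_heptomino}
--     return [[(y, x) in live for x in range(width)] for y in range(height)]
-- ===== Notes on version B (the rewrite author's own statement) =====
-- stated objective: simpler
-- what changed: Instead of allocating an all-False grid and poking 7 cells with an explicit bounds check, B builds a set of absolute live coordinates and produces the grid with one nested comprehension testing membership; bounds are implicit in the comprehension ranges.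
import Mathlib
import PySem

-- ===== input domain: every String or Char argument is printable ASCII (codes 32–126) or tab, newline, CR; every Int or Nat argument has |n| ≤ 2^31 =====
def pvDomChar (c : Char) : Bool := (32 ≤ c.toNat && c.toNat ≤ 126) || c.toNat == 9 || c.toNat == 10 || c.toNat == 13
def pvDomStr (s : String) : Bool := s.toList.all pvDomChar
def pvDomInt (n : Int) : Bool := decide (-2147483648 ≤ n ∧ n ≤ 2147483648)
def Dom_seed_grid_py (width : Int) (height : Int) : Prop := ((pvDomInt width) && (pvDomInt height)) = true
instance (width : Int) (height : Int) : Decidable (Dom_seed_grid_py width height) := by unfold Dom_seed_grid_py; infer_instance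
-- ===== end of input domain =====

-- B replaces A's allocate-then-poke-7-cells loop by a set of absolute live coordinates
-- tested by a nested comprehension over the grid (objective: simpler).

-- ===== PORT A =====
-- the pi_heptomino tuple of offsets
def pvHepto : List (Int × Int) := [(0, 0), (0, 1), (0, 2), (1, 0), (1, 2), (2, 0), (2, 2)]

-- loop body of A's `for dy, dx in pi_heptomino`
def pvStepA (width height oy ox : Int) (g : List (List Bool)) (d : Int × Int) : List (List Bool) :=
  let y := oy + d.1
  let x := ox + d.2
  if 0 ≤ y ∧ y < height ∧ 0 ≤ x ∧ x < width then
    g.modify y.toNat (fun row => row.set x.toNat true)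
  else g

def seed_grid_py (width : Int) (height : Int) : List (List Bool) :=
  let grid := List.replicate height.toNat (List.replicate width.toNat false)
  let oy := PySem.Int.floordiv (height - 3) 2
  let ox := PySem.Int.floordiv (width - 3) 2
  pvHepto.foldl (pvStepA width height oy ox) grid

-- ===== PORT B =====
def seed_grid_py_alt (width : Int) (height : Int) : List (List Bool) :=
  let oy := PySem.Int.floordiv (height - 3) 2
  let ox := PySem.Int.floordiv (width - 3) 2
  let live := PySem.Set.ofList (pvHepto.map (fun d => (oy + d.1, ox + d.2)))
  (PySem.List.pyRange 0 height 1).map (fun y =>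
    (PySem.List.pyRange 0 width 1).map (fun x => decide ((y, x) ∈ live)))

-- ===== PRECONDITION & SPEC =====
def Spec_seed_grid_py (width : Int) (height : Int) (out : List (List Bool)) : Prop := out = seed_grid_py_alt width height
instance (width : Int) (height : Int) (out : List (List Bool)) : Decidable (Spec_seed_grid_py width height out) := by unfold Spec_seed_grid_py; infer_instance

-- ===== CLAIM (what is proved, stated in full; the proofs are below) =====
def Claim_equal_seed_grid_py : Prop := ∀ (width : Int) (height : Int), Dom_seed_grid_py width height → Spec_seed_grid_py width height (seed_grid_py width height)

-- ===== LEMMAS AND PROOFS =====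

-- cell lookup: g[i][j] as an Option
def pvGet2 (g : List (List Bool)) (i j : Nat) : Option Bool := (g[i]?).bind (fun r => r[j]?)

theorem pvStepA_length (width height oy ox : Int) (g : List (List Bool)) (d : Int × Int) :
    (pvStepA width height oy ox g d).length = g.length := by
  unfold pvStepA; dsimp only []; split <;> simp

theorem pvFoldA_length (width height oy ox : Int) (ps : List (Int × Int)) (g : List (List Bool)) :
    (ps.foldl (pvStepA width height oy ox) g).length = g.length := by
  induction ps generalizing g with
  | nil => rfl
  | cons d ps ih => rw [List.foldl_cons, ih, pvStepA_length]

theorem pvStepA_getElem? (width height oy ox : Int) (g : List (List Bool)) (d : Int × Int) (i : Nat) :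
    (pvStepA width height oy ox g d)[i]? =
      if (0 ≤ oy + d.1 ∧ oy + d.1 < height ∧ 0 ≤ ox + d.2 ∧ ox + d.2 < width) ∧ i = (oy + d.1).toNat
      then g[i]?.map (fun row => row.set (ox + d.2).toNat true)
      else g[i]? := by
  unfold pvStepA
  dsimp only []
  by_cases hgd : 0 ≤ oy + d.1 ∧ oy + d.1 < height ∧ 0 ≤ ox + d.2 ∧ ox + d.2 < width
  · rw [if_pos hgd, List.getElem?_modify]
    by_cases hi : i = (oy + d.1).toNat
    · rw [if_pos ⟨hgd, hi⟩]
      cases g[i]? <;> simp [hi]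
    · rw [if_neg (fun h => hi h.2)]
      have hne : ¬ (oy + d.1).toNat = i := fun h => hi h.symm
      cases g[i]? <;> simp [hne]
  · rw [if_neg hgd, if_neg (fun h => hgd h.1)]

theorem pvStepA_get2 (width height oy ox : Int) (g : List (List Bool)) (d : Int × Int)
    (hg : g.length = height.toNat)
    (hr : ∀ (i : Nat) (r : List Bool), g[i]? = some r → r.length = width.toNat)
    (i j : Nat) :
    pvGet2 (pvStepA width height oy ox g d) i j =
      if (0 ≤ oy + d.1 ∧ oy + d.1 < height ∧ 0 ≤ ox + d.2 ∧ ox + d.2 < width)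
          ∧ i = (oy + d.1).toNat ∧ j = (ox + d.2).toNat
      then some true else pvGet2 g i j := by
  unfold pvGet2
  rw [pvStepA_getElem?]
  by_cases h1 : (0 ≤ oy + d.1 ∧ oy + d.1 < height ∧ 0 ≤ ox + d.2 ∧ ox + d.2 < width)
      ∧ i = (oy + d.1).toNat
  · obtain ⟨hb, hi⟩ := h1
    have hlt : i < g.length := by omega
    have hrl : (g[i]).length = width.toNat := hr i _ (List.getElem?_eq_getElem hlt)
    rw [if_pos ⟨hb, hi⟩, List.getElem?_eq_getElem hlt]
    simp only [Option.map_some, Option.bind_some]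
    rw [List.getElem?_set]
    have hx : (ox + d.2).toNat < (g[i]).length := by omega
    by_cases hj : j = (ox + d.2).toNat
    · rw [if_pos hj.symm, if_pos hx, if_pos ⟨hb, hi, hj⟩]
    · rw [if_neg (fun h => hj h.symm), if_neg (fun h => hj h.2.2)]
  · rw [if_neg h1, if_neg (fun h => h1 ⟨h.1, h.2.1⟩)]

theorem pvFoldA_get2 (width height oy ox : Int) (ps : List (Int × Int)) (g : List (List Bool))
    (hg : g.length = height.toNat)
    (hr : ∀ (i : Nat) (r : List Bool), g[i]? = some r → r.length = width.toNat)
    (i j : Nat) :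
    pvGet2 (ps.foldl (pvStepA width height oy ox) g) i j =
      if ∃ d ∈ ps, (0 ≤ oy + d.1 ∧ oy + d.1 < height ∧ 0 ≤ ox + d.2 ∧ ox + d.2 < width)
            ∧ i = (oy + d.1).toNat ∧ j = (ox + d.2).toNat
      then some true else pvGet2 g i j := by
  induction ps generalizing g with
  | nil => simp
  | cons d ps ih =>
    rw [List.foldl_cons]
    have hg' : (pvStepA width height oy ox g d).length = height.toNat := by
      rw [pvStepA_length]; exact hg
    have hr' : ∀ (k : Nat) (r : List Bool), (pvStepA width height oy ox g d)[k]? = some r →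
        r.length = width.toNat := by
      intro k r hk
      rw [pvStepA_getElem?] at hk
      split_ifs at hk with h1
      · cases hgk : g[k]? with
        | none => rw [hgk] at hk; exact absurd hk (by simp)
        | some r0 =>
          rw [hgk] at hk
          simp only [Option.map_some, Option.some.injEq] at hk
          rw [← hk, List.length_set]
          exact hr k r0 hgk
      · exact hr k r hk
    rw [ih _ hg' hr', pvStepA_get2 width height oy ox g d hg hr i j]
    by_cases hd : (0 ≤ oy + d.1 ∧ oy + d.1 < height ∧ 0 ≤ ox + d.2 ∧ ox + d.2 < width)
        ∧ i = (oy + d.1).toNat ∧ j = (ox + d.2).toNat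
    · simp [hd]
    · by_cases hps : ∃ p ∈ ps, (0 ≤ oy + p.1 ∧ oy + p.1 < height ∧ 0 ≤ ox + p.2 ∧ ox + p.2 < width)
          ∧ i = (oy + p.1).toNat ∧ j = (ox + p.2).toNat
      · simp [hd, hps]
      · simp [hd, hps]

theorem pvInit_get2 (hn wn i j : Nat) :
    pvGet2 (List.replicate hn (List.replicate wn false)) i j =
      if i < hn ∧ j < wn then some false else none := by
  unfold pvGet2
  rw [List.getElem?_replicate]
  by_cases hi : i < hn
  · simp only [if_pos hi, Option.bind_some]
    rw [List.getElem?_replicate]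
    by_cases hj : j < wn <;> simp [hi, hj]
  · simp [hi]

theorem pvAlt_get2 (width height : Int) (i j : Nat) :
    pvGet2 (seed_grid_py_alt width height) i j =
      if i < height.toNat ∧ j < width.toNat then
        some (decide (((i : Int), (j : Int)) ∈
          PySem.Set.ofList (pvHepto.map (fun d =>
            (PySem.Int.floordiv (height - 3) 2 + d.1, PySem.Int.floordiv (width - 3) 2 + d.2)))))
      else none := by
  unfold seed_grid_py_alt pvGet2
  dsimp only []
  rw [List.getElem?_map, PySem.List.getElem?_pyRange_one]
  by_cases hi : i < height.toNat
  · rw [if_pos (show i < (height - 0).toNat by omega)]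
    simp only [Option.map_some, Option.bind_some]
    rw [List.getElem?_map, PySem.List.getElem?_pyRange_one]
    by_cases hj : j < width.toNat
    · rw [if_pos (show j < (width - 0).toNat by omega), if_pos (And.intro hi hj)]
      simp only [Option.map_some, zero_add]
    · rw [if_neg (show ¬ j < (width - 0).toNat by omega), if_neg (fun h => hj h.2)]
      rfl
  · rw [if_neg (show ¬ i < (height - 0).toNat by omega), if_neg (fun h => hi h.1)]
    rfl

theorem pvKey (width height : Int) (i j : Nat) :
    pvGet2 (seed_grid_py width height) i j = pvGet2 (seed_grid_py_alt width height) i j := by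
  unfold seed_grid_py
  dsimp only []
  have hr0 : ∀ (k : Nat) (r : List Bool),
      (List.replicate height.toNat (List.replicate width.toNat false))[k]? = some r →
      r.length = width.toNat := by
    intro k r hk
    rw [List.getElem?_replicate] at hk
    split_ifs at hk with h
    · simp only [Option.some.injEq] at hk
      rw [← hk]; simp
  rw [pvFoldA_get2 width height (PySem.Int.floordiv (height - 3) 2) (PySem.Int.floordiv (width - 3) 2)
       pvHepto _ (by simp) hr0, pvInit_get2, pvAlt_get2]
  by_cases hin : i < height.toNat ∧ j < width.toNat
  · have hiff : (∃ d ∈ pvHepto,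
        (0 ≤ PySem.Int.floordiv (height - 3) 2 + d.1 ∧ PySem.Int.floordiv (height - 3) 2 + d.1 < height ∧
         0 ≤ PySem.Int.floordiv (width - 3) 2 + d.2 ∧ PySem.Int.floordiv (width - 3) 2 + d.2 < width)
        ∧ i = (PySem.Int.floordiv (height - 3) 2 + d.1).toNat ∧ j = (PySem.Int.floordiv (width - 3) 2 + d.2).toNat)
      ↔ (((i : Int), (j : Int)) ∈
          PySem.Set.ofList (pvHepto.map (fun d =>
            (PySem.Int.floordiv (height - 3) 2 + d.1, PySem.Int.floordiv (width - 3) 2 + d.2)))) := by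
      rw [PySem.Set.mem_ofList, List.mem_map]
      apply exists_congr; intro d
      constructor
      · rintro ⟨hd, ⟨hb, hi', hj'⟩⟩
        refine ⟨hd, ?_⟩
        have h1 : PySem.Int.floordiv (height - 3) 2 + d.1 = (i : Int) := by omega
        have h2 : PySem.Int.floordiv (width - 3) 2 + d.2 = (j : Int) := by omega
        rw [h1, h2]
      · rintro ⟨hd, he⟩
        have h1 : PySem.Int.floordiv (height - 3) 2 + d.1 = (i : Int) := congrArg Prod.fst he
        have h2 : PySem.Int.floordiv (width - 3) 2 + d.2 = (j : Int) := congrArg Prod.snd he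
        exact ⟨hd, ⟨by omega, by omega, by omega, by omega⟩, by omega, by omega⟩
    split_ifs with hex
    · have hm := hiff.mp hex
      rw [decide_eq_true hm]
    · have hm : ¬ (((i : Int), (j : Int)) ∈
          PySem.Set.ofList (pvHepto.map (fun d =>
            (PySem.Int.floordiv (height - 3) 2 + d.1, PySem.Int.floordiv (width - 3) 2 + d.2)))) :=
        fun h => hex (hiff.mpr h)
      rw [decide_eq_false hm]
  · have hnoex : ¬ (∃ d ∈ pvHepto,
        (0 ≤ PySem.Int.floordiv (height - 3) 2 + d.1 ∧ PySem.Int.floordiv (height - 3) 2 + d.1 < height ∧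
         0 ≤ PySem.Int.floordiv (width - 3) 2 + d.2 ∧ PySem.Int.floordiv (width - 3) 2 + d.2 < width)
        ∧ i = (PySem.Int.floordiv (height - 3) 2 + d.1).toNat ∧ j = (PySem.Int.floordiv (width - 3) 2 + d.2).toNat) := by
      rintro ⟨d, hd, ⟨hb, hi', hj'⟩⟩
      exact hin (by omega)
    rw [if_neg hnoex, if_neg hin, if_neg hin]

theorem pvA_length (width height : Int) : (seed_grid_py width height).length = height.toNat := by
  unfold seed_grid_py; dsimp only []; rw [pvFoldA_length]; simp

theorem pvB_length (width height : Int) : (seed_grid_py_alt width height).length = height.toNat := by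
  unfold seed_grid_py_alt; dsimp only []
  rw [List.length_map, PySem.List.length_pyRange_one]; omega

-- ===== VERDICT (by name: the statement is the Claim_ definition above) =====
theorem seed_grid_py_spec : Claim_equal_seed_grid_py := by
  intro width height _
  unfold Spec_seed_grid_py
  apply List.ext_getElem?
  intro i
  by_cases hi : i < height.toNat
  · have hiA : i < (seed_grid_py width height).length := by rw [pvA_length]; exact hi
    have hiB : i < (seed_grid_py_alt width height).length := by rw [pvB_length]; exact hi
    rw [List.getElem?_eq_getElem hiA, List.getElem?_eq_getElem hiB]
    congr 1
    apply List.ext_getElem?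
    intro j
    have h1 : (seed_grid_py width height)[i][j]? = pvGet2 (seed_grid_py width height) i j := by
      unfold pvGet2; rw [List.getElem?_eq_getElem hiA]; rfl
    have h2 : (seed_grid_py_alt width height)[i][j]? = pvGet2 (seed_grid_py_alt width height) i j := by
      unfold pvGet2; rw [List.getElem?_eq_getElem hiB]; rfl
    rw [h1, h2, pvKey]
  · rw [List.getElem?_eq_none (by rw [pvA_length]; omega),
        List.getElem?_eq_none (by rw [pvB_length]; omega)]
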